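-- pv_equiv track=rewrite | github.com/lilintech/graph-analysis | server.py | maximum_cardinality_search_efficient
-- ===== SOURCE A (Python) =====
-- import heapq
--
-- def maximum_cardinality_search_efficient(graph):
--     """More efficient MCS implementation to find Perfect Elimination Ordering"""
--     if not graph:
--         return []
--
--     weights = {node: 0 for node in graph}
--     visited = set()
--     order = []
--
--     # Use a max-heap for efficient maximum weight retrieval
--     heap = [(-weight, node) for node, weight in weights.items()]
--     heapq.heapify(heap)
--
--     while heap:
--         # GREEDY CHOICE: Pick node with maximum weight
--         _, node = heapq.heappop(heap)
--         if node in visited: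
--             continue
--
--         visited.add(node)
--         order.append(node)
--
--         # Update weights of neighbors
--         for neighbor in graph.get(node, []):
--             if neighbor not in visited:
--                 weights[neighbor] += 1
--                 heapq.heappush(heap, (-weights[neighbor], neighbor))
--
--     return order
-- ===== SOURCE B (Python) =====
-- def maximum_cardinality_search_efficient(graph):
--     """MCS by full rescan: each round pick the unvisited node minimizing (-weight, node)."""
--     weights = {node: 0 for node in graph}
--     visited = set()
--     order = []
--     for _ in range(len(weights)):
--         node = min((n for n in weights if n not in visited),
--                    key=lambda n: (-weights[n], n))
--         visited.add(node)
--         order.append(node)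
--         for neighbor in graph.get(node, []):
--             if neighbor not in visited:
--                 weights[neighbor] += 1
--     return order
-- ===== Notes on version B (the rewrite author's own statement) =====
-- stated objective: simpler
-- what changed: B replaces A's lazy-deletion binary heap (with stale entries re-pushed on every weight update and skipped on pop) by a plain rescan: each of the len(weights) rounds picks the unvisited node minimizing (-weight, node) directly with min(); the neighbour weight update stays the same.
-- outside the precondition, e.g. on maximum_cardinality_search_efficient({'a': ['b']}): A raises KeyError, B raises KeyError
import Mathlib
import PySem

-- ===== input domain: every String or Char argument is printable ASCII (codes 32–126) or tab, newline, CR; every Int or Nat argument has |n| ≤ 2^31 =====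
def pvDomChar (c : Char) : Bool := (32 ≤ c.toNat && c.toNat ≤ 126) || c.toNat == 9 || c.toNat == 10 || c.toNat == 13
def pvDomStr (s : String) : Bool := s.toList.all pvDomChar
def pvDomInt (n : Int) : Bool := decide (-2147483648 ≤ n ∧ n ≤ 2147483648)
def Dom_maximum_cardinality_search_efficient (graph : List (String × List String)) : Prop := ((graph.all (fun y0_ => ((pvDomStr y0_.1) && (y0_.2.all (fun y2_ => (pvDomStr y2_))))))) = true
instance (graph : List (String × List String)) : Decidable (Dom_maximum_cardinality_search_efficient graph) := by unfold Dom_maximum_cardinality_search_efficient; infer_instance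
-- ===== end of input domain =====

-- B replaces A's lazy-deletion heap by a full rescan of the unvisited nodes each round
-- (alternative: same O(V·(V+E))-ish cost class, simpler selection loop, no heap state).

-- ===== PORT A =====
-- heapq is ported by its observable contract: the heap is the plain list of its entries,
-- heapify/heappush only rearrange/append, and heappop removes the least entry in Python's
-- tuple order on (Int × String); since heappop's result is exactly that least tuple, this
-- is exact.
def pqMin? (heap : List (Int × String)) : Option (Int × String) :=
  PySem.List.min2? heap (fun p => p.1) (fun p => p.2)

-- `for neighbor in graph.get(node, []): if neighbor not in visited: weights[neighbor] += 1`
-- together with A's heappush; Python raises KeyError when `neighbor` is not a key of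
-- `weights` (excluded by Pre_): the port reads a default of 0 there.
def nbStep (visited' : PySem.Set String)
    (p : PySem.Dict String Int × List (Int × String)) (nb : String) :
    PySem.Dict String Int × List (Int × String) :=
  if PySem.Set.contains visited' nb then p
  else
    let w := p.1.getD nb 0 + 1
    (p.1.insert nb w, p.2 ++ [(-w, nb)])

def degSum (g : PySem.Dict String (List String)) : Nat :=
  (g.values.map List.length).sum

-- A's while-loop over the heap (lazy deletion: a popped already-visited node is skipped).
-- The Nat argument is a totality guard only: the caller passes the proved upper bound
-- heap.length + |keys| * (1 + degSum) on the number of iterations, so the 0 case is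
-- never reached (the bisimulation below runs inside this bound).
def mcsLoop (g : PySem.Dict String (List String)) : Nat → List (Int × String) →
    PySem.Dict String Int → PySem.Set String → List String → List String
  | 0, _, _, _, order => order
  | N + 1, heap, weights, visited, order =>
    match pqMin? heap with
    | none => order
    | some m =>
      let heap1 := heap.erase m
      if PySem.Set.contains visited m.2 then
        mcsLoop g N heap1 weights visited order
      else
        let visited' := PySem.Set.add visited m.2
        let st := (g.getD m.2 []).foldl (nbStep visited') (weights, heap1)
        mcsLoop g N st.2 st.1 visited' (order ++ [m.2])

def maximum_cardinality_search_efficient (graph : List (String × List String)) : List String :=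
  if graph.isEmpty then []
  else
    let g := PySem.Dict.ofList graph
    let weights := g.keys.foldl (fun d n => d.insert n (0 : Int)) PySem.Dict.empty
    let heap := weights.items.map (fun p => (-p.2, p.1))
    mcsLoop g (heap.length + g.keys.length * (1 + degSum g)) heap weights PySem.Set.empty []

-- ===== PORT B =====
-- `weights[neighbor] += 1` (KeyError when absent — excluded by Pre_: default 0 read there)
def nbStepB (visited' : PySem.Set String) (d : PySem.Dict String Int) (nb : String) :
    PySem.Dict String Int :=
  if PySem.Set.contains visited' nb then d else d.insert nb (d.getD nb 0 + 1)

-- `for _ in range(len(weights))`: one selected node per round, by rescanning all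
-- unvisited keys for the least (-weight, node)
def altRun (g : PySem.Dict String (List String)) : Nat → PySem.Dict String Int →
    PySem.Set String → List String → List String
  | 0, _, _, order => order
  | k + 1, weights, visited, order =>
    match PySem.List.min2? (g.keys.filter (fun n => !PySem.Set.contains visited n))
        (fun n => -(weights.getD n 0)) (fun n => n) with
    | none => order  -- min() of an empty iterable raises ValueError; unreachable from the initial state
    | some node =>
      let visited' := PySem.Set.add visited node
      let weights' := (g.getD node []).foldl (nbStepB visited') weights
      altRun g k weights' visited' (order ++ [node])

def maximum_cardinality_search_efficient_alt (graph : List (String × List String)) : List String :=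
  let g := PySem.Dict.ofList graph
  let weights := g.keys.foldl (fun d n => d.insert n (0 : Int)) PySem.Dict.empty
  altRun g g.keys.length weights PySem.Set.empty []

-- ===== PRECONDITION & SPEC =====
-- Pre_ excludes exactly the graphs with a neighbour that is not itself a key of the
-- graph: there Python's `weights[neighbor] += 1` raises KeyError (in A and in B alike).
def Pre_maximum_cardinality_search_efficient (graph : List (String × List String)) : Prop :=
  ∀ p ∈ (PySem.Dict.ofList graph).items, ∀ nb ∈ p.2,
    (PySem.Dict.ofList graph).contains nb = true
instance (graph : List (String × List String)) : Decidable (Pre_maximum_cardinality_search_efficient graph) := by unfold Pre_maximum_cardinality_search_efficient; infer_instance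

def pvWitness_maximum_cardinality_search_efficient : (List (String × List String)) :=
  [("a", ["b"]), ("b", ["a", "c"]), ("c", [])]

def Spec_maximum_cardinality_search_efficient (graph : List (String × List String)) (out : List String) : Prop := out = maximum_cardinality_search_efficient_alt graph
instance (graph : List (String × List String)) (out : List String) : Decidable (Spec_maximum_cardinality_search_efficient graph out) := by unfold Spec_maximum_cardinality_search_efficient; infer_instance

-- ===== CLAIM (what is proved, stated in full; the proofs are below) =====
def Claim_equal_maximum_cardinality_search_efficient : Prop := ∀ (graph : List (String × List String)), Dom_maximum_cardinality_search_efficient graph → Pre_maximum_cardinality_search_efficient graph → Spec_maximum_cardinality_search_efficient graph (maximum_cardinality_search_efficient graph)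

-- ===== LEMMAS AND PROOFS =====

-- unvisited keys and the size bound used as termination measure
def unvis (g : PySem.Dict String (List String)) (visited : PySem.Set String) : List String :=
  g.keys.filter (fun n => !PySem.Set.contains visited n)

-- least entry of a non-empty heap exists (used by the ports' termination and the proofs)
-- the foldl step inside PySem.List.min2? at key types Int × String, named for induction
def pvStep {α : Type} (k1 : α → Int) (k2 : α → String) (acc : Option α) (x : α) : Option α :=
  match acc with
  | none => some x
  | some m => if (decide (k1 x < k1 m) || !decide (k1 m < k1 x) && decide (k2 x < k2 m)) = true then some x else some m

theorem pvStep_none {α : Type} (k1 : α → Int) (k2 : α → String) (x : α) :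
    pvStep k1 k2 none x = some x := rfl

theorem pvStep_some {α : Type} (k1 : α → Int) (k2 : α → String) (a x : α) :
    pvStep k1 k2 (some a) x =
      if (decide (k1 x < k1 a) || !decide (k1 a < k1 x) && decide (k2 x < k2 a)) = true
      then some x else some a := rfl

theorem pvStep_mem {α : Type} (k1 : α → Int) (k2 : α → String) (xs : List α) :
    ∀ (acc : Option α) (m : α), xs.foldl (pvStep k1 k2) acc = some m →
      m ∈ xs ∨ acc = some m := by
  induction xs with
  | nil => intro acc m h; exact Or.inr h
  | cons x xs ih =>
    intro acc m h
    rcases ih (pvStep k1 k2 acc x) m h with h1 | h1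
    · exact Or.inl (List.mem_cons_of_mem _ h1)
    · cases acc with
      | none => rw [pvStep_none] at h1; cases h1; exact Or.inl List.mem_cons_self
      | some a =>
        rw [pvStep_some] at h1
        by_cases hc : (decide (k1 x < k1 a) || !decide (k1 a < k1 x) && decide (k2 x < k2 a)) = true
        · rw [if_pos hc] at h1; cases h1; exact Or.inl List.mem_cons_self
        · rw [if_neg hc] at h1; exact Or.inr h1

theorem pvMin2_mem {α : Type} (k1 : α → Int) (k2 : α → String) (xs : List α) (m : α)
    (h : PySem.List.min2? xs k1 k2 = some m) : m ∈ xs := by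
  have heq : PySem.List.min2? xs k1 k2 = xs.foldl (pvStep k1 k2) none := rfl
  rcases pvStep_mem k1 k2 xs none m (heq ▸ h) with h1 | h1
  · exact h1
  · cases h1

theorem pvNbStep_len (visited' : PySem.Set String) (l : List String) :
    ∀ (p : PySem.Dict String Int × List (Int × String)),
    (l.foldl (nbStep visited') p).2.length ≤ p.2.length + l.length := by
  induction l with
  | nil => intro p; simp
  | cons x xs ih =>
    intro p
    have h1 : (nbStep visited' p x).2.length ≤ p.2.length + 1 := by
      unfold nbStep; split
      · omega
      · simp
    calc ((x :: xs).foldl (nbStep visited') p).2.length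
        = (xs.foldl (nbStep visited') (nbStep visited' p x)).2.length := by rw [List.foldl_cons]
      _ ≤ (nbStep visited' p x).2.length + xs.length := ih _
      _ ≤ p.2.length + (x :: xs).length := by simp only [List.length_cons]; omega

theorem pvDeg_le (g : PySem.Dict String (List String)) (m : String) (h : m ∈ g.keys) :
    (g.getD m []).length ≤ degSum g := by
  have hc : g.contains m = true := (PySem.Dict.contains_iff_mem_keys g m).mpr h
  rw [PySem.Dict.contains_eq_isSome_get?] at hc
  obtain ⟨v, hv⟩ := Option.isSome_iff_exists.mp hc
  rw [PySem.Dict.getD_of_get?_eq_some g [] hv]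
  have hmem : (m, v) ∈ g.items := PySem.Dict.mem_items_of_get?_eq_some g hv
  have hvv : v.length ∈ g.values.map List.length := by
    simp only [PySem.Dict.values, List.map_map]
    exact List.mem_map.mpr ⟨(m, v), hmem, rfl⟩
  exact List.single_le_sum (fun x _ => Nat.zero_le x) _ hvv

theorem pvContains_add (v : PySem.Set String) (m n : String) :
    PySem.Set.contains (PySem.Set.add v m) n = (PySem.Set.contains v n || n == m) := by
  apply Bool.eq_iff_iff.mpr
  rw [Bool.or_eq_true, beq_iff_eq]
  rw [PySem.Set.contains_iff, PySem.Set.contains_iff, PySem.Set.mem_add]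

theorem pvUnvis_add (g : PySem.Dict String (List String)) (v : PySem.Set String)
    (m : String) :
    unvis g (PySem.Set.add v m) = (unvis g v).filter (fun n => !(n == m)) := by
  unfold unvis
  rw [List.filter_filter]
  apply List.filter_congr
  intro n _
  rw [pvContains_add]
  cases PySem.Set.contains v n <;> cases hnm : (n == m) <;> simp

theorem pvMem_unvis (g : PySem.Dict String (List String)) (v : PySem.Set String)
    (n : String) : n ∈ unvis g v ↔ n ∈ g.keys ∧ PySem.Set.contains v n = false := by
  unfold unvis
  rw [List.mem_filter]
  simp

-- Python's strict order on the key pairs (-weight, node)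
def LtP (p q : Int × String) : Prop := p.1 < q.1 ∨ (p.1 = q.1 ∧ p.2 < q.2)

theorem pvLtP_trans {p q r : Int × String} (h1 : LtP p q) (h2 : LtP q r) : LtP p r := by
  rcases h1 with h1 | ⟨h1, h1'⟩ <;> rcases h2 with h2 | ⟨h2, h2'⟩
  · exact Or.inl (lt_trans h1 h2)
  · exact Or.inl (h2 ▸ h1)
  · exact Or.inl (h1 ▸ h2)
  · exact Or.inr ⟨h1.trans h2, lt_trans h1' h2'⟩

theorem pvLtP_irrefl (p : Int × String) : ¬ LtP p p := by
  rintro (h | ⟨h, h'⟩)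
  · exact lt_irrefl _ h
  · exact lt_irrefl _ h'

theorem pvLtP_eq_of_not {p q : Int × String} (h1 : ¬ LtP p q) (h2 : ¬ LtP q p) : p = q := by
  unfold LtP at h1 h2
  push Not at h1 h2
  have hi : p.1 = q.1 := le_antisymm h2.1 h1.1
  have hs : p.2 = q.2 := le_antisymm (h2.2 hi.symm) (h1.2 hi)
  exact Prod.ext hi hs

-- min2? returns an element no other element strictly precedes (Python's min)
theorem pvCond_iff {α : Type} (k1 : α → Int) (k2 : α → String) (x a : α) :
    (decide (k1 x < k1 a) || !decide (k1 a < k1 x) && decide (k2 x < k2 a)) = true ↔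
      LtP (k1 x, k2 x) (k1 a, k2 a) := by
  simp only [Bool.or_eq_true, Bool.and_eq_true, Bool.not_eq_true', decide_eq_true_eq,
    decide_eq_false_iff_not, LtP]
  constructor
  · rintro (h | ⟨h1, h2⟩)
    · exact Or.inl h
    · rcases lt_trichotomy (k1 x) (k1 a) with h3 | h3 | h3
      · exact Or.inl h3
      · exact Or.inr ⟨h3, h2⟩
      · exact absurd h3 h1
  · rintro (h | ⟨h1, h2⟩)
    · exact Or.inl h
    · exact Or.inr ⟨by rw [h1]; exact lt_irrefl _, h2⟩

theorem pvFold_spec {α : Type} (k1 : α → Int) (k2 : α → String) (xs : List α) :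
    ∀ (acc : Option α) (m : α), xs.foldl (pvStep k1 k2) acc = some m →
      (∀ y ∈ xs, ¬ LtP (k1 y, k2 y) (k1 m, k2 m)) ∧
      (∀ a, acc = some a → ¬ LtP (k1 a, k2 a) (k1 m, k2 m)) := by
  induction xs with
  | nil =>
    intro acc m h
    refine ⟨by simp, fun a ha => ?_⟩
    rw [List.foldl_nil] at h
    rw [h] at ha
    cases ha
    exact pvLtP_irrefl _
  | cons x xs ih =>
    intro acc m h
    rw [List.foldl_cons] at h
    obtain ⟨ih2, ih3⟩ := ih (pvStep k1 k2 acc x) m h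
    have hx : ¬ LtP (k1 x, k2 x) (k1 m, k2 m) := by
      cases acc with
      | none => exact ih3 x (by rw [pvStep_none])
      | some a =>
        by_cases hc : (decide (k1 x < k1 a) || !decide (k1 a < k1 x) && decide (k2 x < k2 a)) = true
        · exact ih3 x (by rw [pvStep_some, if_pos hc])
        · have hax : ¬ LtP (k1 x, k2 x) (k1 a, k2 a) := fun hl => hc ((pvCond_iff k1 k2 x a).mpr hl)
          have ham : ¬ LtP (k1 a, k2 a) (k1 m, k2 m) := ih3 a (by rw [pvStep_some, if_neg hc])
          intro hxm
          by_cases h2 : LtP (k1 a, k2 a) (k1 x, k2 x)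
          · exact ham (pvLtP_trans h2 hxm)
          · have heq := pvLtP_eq_of_not hax h2
            exact ham (heq ▸ hxm)
    constructor
    · intro y hy
      rcases List.mem_cons.mp hy with rfl | hy
      · exact hx
      · exact ih2 y hy
    · intro a ha
      cases acc with
      | none => cases ha
      | some a0 =>
        cases ha
        by_cases hc : (decide (k1 x < k1 a) || !decide (k1 a < k1 x) && decide (k2 x < k2 a)) = true
        · have hxa := (pvCond_iff k1 k2 x a).mp hc
          have hxm := ih3 x (by rw [pvStep_some, if_pos hc])
          intro ham
          exact hxm (pvLtP_trans hxa ham)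
        · exact ih3 a (by rw [pvStep_some, if_neg hc])

theorem pvMin2_isMin {α : Type} (k1 : α → Int) (k2 : α → String) (xs : List α) (m : α)
    (h : PySem.List.min2? xs k1 k2 = some m) :
    ∀ y ∈ xs, ¬ LtP (k1 y, k2 y) (k1 m, k2 m) := by
  have heq : PySem.List.min2? xs k1 k2 = xs.foldl (pvStep k1 k2) none := rfl
  exact (pvFold_spec k1 k2 xs none m (heq ▸ h)).1

theorem pvFold_ne_none {α : Type} (k1 : α → Int) (k2 : α → String) (xs : List α) :
    ∀ (a : α), xs.foldl (pvStep k1 k2) (some a) ≠ none := by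
  induction xs with
  | nil => intro a h; cases h
  | cons x xs ih =>
    intro a
    rw [List.foldl_cons, pvStep_some]
    split
    · exact ih x
    · exact ih a

theorem pvMin2_ne_none {α : Type} (k1 : α → Int) (k2 : α → String) (xs : List α)
    (hne : xs ≠ []) : PySem.List.min2? xs k1 k2 ≠ none := by
  have heq : PySem.List.min2? xs k1 k2 = xs.foldl (pvStep k1 k2) none := rfl
  rw [heq]
  cases xs with
  | nil => exact absurd rfl hne
  | cons x t =>
    rw [List.foldl_cons, pvStep_none]
    exact pvFold_ne_none k1 k2 t x


-- the pair component of A's neighbour loop is exactly B's neighbour loop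
theorem pvFold_fst (v' : PySem.Set String) (l : List String) :
    ∀ (p : PySem.Dict String Int × List (Int × String)),
      (l.foldl (nbStep v') p).1 = l.foldl (nbStepB v') p.1 := by
  induction l with
  | nil => intro p; rfl
  | cons x xs ih =>
    intro p
    rw [List.foldl_cons, List.foldl_cons, ih]
    have : (nbStep v' p x).1 = nbStepB v' p.1 x := by
      unfold nbStep nbStepB
      by_cases hc : PySem.Set.contains v' x = true
      · rw [if_pos hc, if_pos hc]
      · rw [if_neg hc, if_neg hc]
    rw [this]

-- every node that stays unvisited keeps a fresh heap entry through the neighbour loop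
theorem pvFold_fresh (v' : PySem.Set String) (K : String → Prop) (l : List String) :
    ∀ (p : PySem.Dict String Int × List (Int × String)),
      (∀ n, K n → PySem.Set.contains v' n = false → (-(p.1.getD n 0), n) ∈ p.2) →
      ∀ n, K n → PySem.Set.contains v' n = false →
        (-((l.foldl (nbStep v') p).1.getD n 0), n) ∈ (l.foldl (nbStep v') p).2 := by
  induction l with
  | nil => intro p hp; exact hp
  | cons x xs ih =>
    intro p hp
    rw [List.foldl_cons]
    apply ih
    intro n hK hn
    unfold nbStep
    by_cases hc : PySem.Set.contains v' x = true
    · rw [if_pos hc]; exact hp n hK hn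
    · rw [if_neg hc]
      by_cases hnx : n = x
      · subst hnx
        simp only [PySem.Dict.getD_insert_self]
        exact List.mem_append_right _ List.mem_cons_self
      · rw [PySem.Dict.getD_insert_of_ne _ _ _ hnx]
        exact List.mem_append_left _ (hp n hK hn)

-- heap entries stay sound (key of the graph, weight at most the current one) through the loop
theorem pvFold_sound (v' : PySem.Set String) (K : String → Prop) (l : List String) :
    (∀ nb ∈ l, K nb) →
    ∀ (p : PySem.Dict String Int × List (Int × String)),
      (∀ e ∈ p.2, K e.2 ∧ -(p.1.getD e.2 0) ≤ e.1) →
      ∀ e ∈ (l.foldl (nbStep v') p).2,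
        K e.2 ∧ -((l.foldl (nbStep v') p).1.getD e.2 0) ≤ e.1 := by
  induction l with
  | nil => intro _ p hp; exact hp
  | cons x xs ih =>
    intro hl p hp
    rw [List.foldl_cons]
    apply ih (fun nb hnb => hl nb (List.mem_cons_of_mem _ hnb))
    intro e he
    unfold nbStep at he ⊢
    by_cases hc : PySem.Set.contains v' x = true
    · rw [if_pos hc] at he ⊢; exact hp e he
    · rw [if_neg hc] at he ⊢
      simp only at he ⊢
      rcases List.mem_append.mp he with he | he
      · obtain ⟨hK, hb⟩ := hp e he
        refine ⟨hK, ?_⟩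
        rw [PySem.Dict.getD_insert]
        split_ifs with h
        · rw [h] at hb; omega
        · exact hb
      · have he' : e = (-(p.1.getD x 0 + 1), x) := List.mem_singleton.mp he
        subst he'
        refine ⟨hl x List.mem_cons_self, ?_⟩
        simp only [PySem.Dict.getD_insert_self]
        exact le_refl _

-- unfolding equations for mcsLoop
theorem pvLoop_none (g : PySem.Dict String (List String)) (N : Nat) (heap : List (Int × String))
    (w : PySem.Dict String Int) (v : PySem.Set String) (o : List String)
    (h : pqMin? heap = none) : mcsLoop g (N + 1) heap w v o = o := by
  simp only [mcsLoop, h]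

theorem pvLoop_visited (g : PySem.Dict String (List String)) (N : Nat) (heap : List (Int × String))
    (w : PySem.Dict String Int) (v : PySem.Set String) (o : List String) (m : Int × String)
    (h : pqMin? heap = some m) (hv : PySem.Set.contains v m.2 = true) :
    mcsLoop g (N + 1) heap w v o = mcsLoop g N (heap.erase m) w v o := by
  simp only [mcsLoop, h]
  rw [if_pos hv]

theorem pvLoop_select (g : PySem.Dict String (List String)) (N : Nat) (heap : List (Int × String))
    (w : PySem.Dict String Int) (v : PySem.Set String) (o : List String) (m : Int × String)
    (h : pqMin? heap = some m) (hv : PySem.Set.contains v m.2 = false) :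
    mcsLoop g (N + 1) heap w v o =
      mcsLoop g N ((g.getD m.2 []).foldl (nbStep (PySem.Set.add v m.2)) (w, heap.erase m)).2
        ((g.getD m.2 []).foldl (nbStep (PySem.Set.add v m.2)) (w, heap.erase m)).1
        (PySem.Set.add v m.2) (o ++ [m.2]) := by
  simp only [mcsLoop, h]
  rw [if_neg (by rw [hv]; exact Bool.false_ne_true)]

theorem pvMin2_none_nil {α : Type} (k1 : α → Int) (k2 : α → String) (xs : List α)
    (h : PySem.List.min2? xs k1 k2 = none) : xs = [] := by
  by_contra hne
  exact pvMin2_ne_none k1 k2 xs hne h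

-- the bisimulation: A's heap loop and B's rescan loop produce the same order
theorem pvBisim (g : PySem.Dict String (List String)) (hnd : g.keys.Nodup)
    (hcl : ∀ par ∈ g.items, ∀ nb ∈ par.2, nb ∈ g.keys) :
    ∀ (N : Nat) (heap : List (Int × String)) (weights : PySem.Dict String Int)
      (visited : PySem.Set String) (order : List String),
      heap.length + (unvis g visited).length * (1 + degSum g) ≤ N →
      (∀ n ∈ unvis g visited, (-(weights.getD n 0), n) ∈ heap) →
      (∀ e ∈ heap, e.2 ∈ g.keys ∧ -(weights.getD e.2 0) ≤ e.1) →
      mcsLoop g N heap weights visited order =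
        altRun g (unvis g visited).length weights visited order := by
  intro N
  induction N with
  | zero =>
    intro heap weights visited order hN h1 h2
    have hh : heap = [] := by
      cases heap with
      | nil => rfl
      | cons a t => simp at hN
    subst hh
    have hu : unvis g visited = [] := by
      rw [List.eq_nil_iff_forall_not_mem]
      intro n hn
      exact absurd (h1 n hn) (List.not_mem_nil)
    rw [hu]
    rfl
  | succ N ih =>
    intro heap weights visited order hN h1 h2
    cases hm : pqMin? heap with
    | none =>
      have hh : heap = [] := pvMin2_none_nil _ _ _ hm
      subst hh
      have hu : unvis g visited = [] := by
        rw [List.eq_nil_iff_forall_not_mem]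
        intro n hn
        exact absurd (h1 n hn) (List.not_mem_nil)
      rw [hu, pvLoop_none _ _ _ _ _ _ rfl]
      rfl
    | some m =>
      have hm2 := pvMin2_mem _ _ _ _ hm
      have herase := List.length_erase_of_mem hm2
      have hpos := List.length_pos_of_mem hm2
      by_cases hv : PySem.Set.contains visited m.2 = true
      · -- lazy deletion: skip an already-visited popped node
        rw [pvLoop_visited _ _ _ _ _ _ _ hm hv]
        apply ih
        · omega
        · intro n hn
          have hn' := (pvMem_unvis g visited n).mp hn
          have hne : n ≠ m.2 := fun e => by rw [e] at hn'; rw [hn'.2] at hv; cases hv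
          have hne2 : (-(weights.getD n 0), n) ≠ m := fun e => hne (by rw [← e])
          exact (List.mem_erase_of_ne hne2).mpr (h1 n hn)
        · intro e he
          exact h2 e (List.erase_subset he)
      · -- a genuinely new node: it is exactly B's selection
        have hv' : PySem.Set.contains visited m.2 = false := by
          rw [Bool.not_eq_true] at hv; exact hv
        have hkey : m.2 ∈ g.keys := (h2 m hm2).1
        have hmu : m.2 ∈ unvis g visited := (pvMem_unvis g visited m.2).mpr ⟨hkey, hv'⟩
        have hfresh := h1 m.2 hmu
        have hmq : PySem.List.min2? heap (fun p : Int × String => p.1)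
            (fun p : Int × String => p.2) = some m := hm
        have hmins := pvMin2_isMin _ _ heap m hmq
        -- the popped entry is the fresh entry of its node
        have hma : m = (-(weights.getD m.2 0), m.2) := by
          have h3 := hmins _ hfresh
          have h4 : -(weights.getD m.2 0) ≤ m.1 := (h2 m hm2).2
          simp only at h3
          have h5 : m.1 = -(weights.getD m.2 0) := by
            by_contra hne
            exact h3 (Or.inl (lt_of_le_of_ne h4 (fun e => hne e.symm)))
          exact Prod.ext h5 rfl
        -- B's rescan selects the same node
        obtain ⟨m', hm'⟩ : ∃ m', PySem.List.min2? (unvis g visited)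
            (fun n => -(weights.getD n 0)) (fun n => n) = some m' := by
          cases hmm : PySem.List.min2? (unvis g visited)
              (fun n => -(weights.getD n 0)) (fun n => n) with
          | none => exact absurd hmm (pvMin2_ne_none _ _ _ (List.ne_nil_of_mem hmu))
          | some m' => exact ⟨m', rfl⟩
        have hm'm : m' = m.2 := by
          have hm'mem := pvMin2_mem _ _ _ _ hm'
          have h6 := pvMin2_isMin _ _ _ _ hm' _ hmu
          have h7 := hmins _ (h1 m' hm'mem)
          simp only at h6 h7
          rw [hma] at h7
          simp only at h7
          have := pvLtP_eq_of_not h7 h6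
          exact congrArg Prod.snd this
        subst hm'm
        -- unfold both loops one step
        obtain ⟨k, hk⟩ : ∃ k, (unvis g visited).length = k + 1 := by
          have := List.length_pos_of_mem hmu
          exact ⟨(unvis g visited).length - 1, by omega⟩
        have hUdef : g.keys.filter (fun n => !PySem.Set.contains visited n) = unvis g visited := rfl
        rw [pvLoop_select _ _ _ _ _ _ _ hm hv', hk]
        show _ = altRun g (k + 1) weights visited order
        rw [show altRun g (k + 1) weights visited order =
            match PySem.List.min2? (g.keys.filter (fun n => !PySem.Set.contains visited n))
                (fun n => -(weights.getD n 0)) (fun n => n) with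
            | none => order
            | some node =>
                altRun g k ((g.getD node []).foldl (nbStepB (PySem.Set.add visited node)) weights)
                  (PySem.Set.add visited node) (order ++ [node]) from rfl]
        rw [hUdef, hm']
        -- the states coincide
        have hfst := pvFold_fst (PySem.Set.add visited m.2) (g.getD m.2 []) (weights, heap.erase m)
        rw [hfst]
        -- remaining unvisited count
        have hkcount : (unvis g (PySem.Set.add visited m.2)).length = k := by
          rw [pvUnvis_add]
          have hUnd : (unvis g visited).Nodup := List.Nodup.filter _ hnd
          have : (unvis g visited).filter (fun n => !(n == m.2)) =
              (unvis g visited).erase m.2 := by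
            rw [hUnd.erase_eq_filter]
            apply List.filter_congr
            intro n _
            simp [bne]
          rw [this, List.length_erase_of_mem hmu, hk]
          omega
        rw [← hkcount]
        -- neighbours of a key are keys (Pre_)
        have hnb : ∀ nb ∈ g.getD m.2 [], nb ∈ g.keys := by
          have hc : g.contains m.2 = true := (PySem.Dict.contains_iff_mem_keys g m.2).mpr hkey
          rw [PySem.Dict.contains_eq_isSome_get?] at hc
          obtain ⟨val, hval⟩ := Option.isSome_iff_exists.mp hc
          rw [PySem.Dict.getD_of_get?_eq_some g [] hval]
          exact hcl (m.2, val) (PySem.Dict.mem_items_of_get?_eq_some g hval)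
        apply ih
        · -- measure
          have hst := pvNbStep_len (PySem.Set.add visited m.2) (g.getD m.2 [])
            (weights, heap.erase m)
          have hdeg := pvDeg_le g m.2 hkey
          simp only at hst
          rw [hkcount]
          rw [hk] at hN
          rw [Nat.succ_mul] at hN
          omega
        · -- fresh entries
          intro n hn
          simp only [← hfst]
          obtain ⟨hkn, hvn⟩ := (pvMem_unvis g _ n).mp hn
          refine pvFold_fresh (PySem.Set.add visited m.2) (fun n => n ∈ g.keys)
            (g.getD m.2 []) (weights, heap.erase m) ?_ n hkn hvn
          intro n' hkn' hvn'
          have hvn0 : PySem.Set.contains visited n' = false := by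
            rw [pvContains_add] at hvn'
            rcases Bool.or_eq_false_iff.mp hvn' with ⟨ha, _⟩
            exact ha
          have hne : n' ≠ m.2 := by
            rw [pvContains_add] at hvn'
            rcases Bool.or_eq_false_iff.mp hvn' with ⟨_, hb⟩
            exact fun e => by rw [e] at hb; simp at hb
          have hmem := h1 n' ((pvMem_unvis g visited n').mpr ⟨hkn', hvn0⟩)
          have hne2 : (-(weights.getD n' 0), n') ≠ m := by
            rw [hma]
            exact fun e => hne (congrArg Prod.snd e)
          exact (List.mem_erase_of_ne hne2).mpr hmem
        · -- sound entries
          simp only [← hfst]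
          refine pvFold_sound (PySem.Set.add visited m.2) (fun n => n ∈ g.keys)
            (g.getD m.2 []) hnb (weights, heap.erase m) ?_
          intro e he
          exact h2 e (List.erase_subset he)

theorem pvInit_getD (l : List String) :
    ∀ (d : PySem.Dict String Int) (n : String),
      (l.foldl (fun d x => d.insert x (0 : Int)) d).getD n 0 =
        if n ∈ l then 0 else d.getD n 0 := by
  induction l with
  | nil => intro d n; simp
  | cons x xs ih =>
    intro d n
    rw [List.foldl_cons, ih, PySem.Dict.getD_insert]
    by_cases h1 : n ∈ xs
    · simp [h1, List.mem_cons]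
    · by_cases h2 : n = x <;> simp [h1, h2, List.mem_cons]

theorem maximum_cardinality_search_efficient_spec : Claim_equal_maximum_cardinality_search_efficient := by
  intro graph _ hpre
  unfold Spec_maximum_cardinality_search_efficient
  by_cases hg : graph.isEmpty = true
  · rw [List.isEmpty_iff.mp hg]
    rfl
  · unfold maximum_cardinality_search_efficient maximum_cardinality_search_efficient_alt
    rw [if_neg hg]
    dsimp only
    set g := PySem.Dict.ofList graph with hgdef
    set w0 := g.keys.foldl (fun d n => d.insert n (0 : Int)) PySem.Dict.empty with hw0
    have hnd : g.keys.Nodup := PySem.Dict.nodup_keys_ofList graph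
    have hitems : w0.items = g.keys.map (fun n => (n, (0 : Int))) := by
      have := PySem.Dict.items_foldl_insert_fresh g.keys (fun n => n) (fun _ => (0 : Int))
        PySem.Dict.empty (fun a _ => PySem.Dict.contains_empty a) (by simpa using hnd)
      simpa using this
    have hgetD : ∀ n ∈ g.keys, w0.getD n 0 = 0 := by
      intro n hn
      rw [hw0, pvInit_getD, if_pos hn]
    have hcl : ∀ par ∈ g.items, ∀ nb ∈ par.2, nb ∈ g.keys := by
      intro par hpar nb hnb
      exact (PySem.Dict.contains_iff_mem_keys g nb).mp (hpre par hpar nb hnb)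
    have hu0 : unvis g PySem.Set.empty = g.keys := by
      unfold unvis
      apply List.filter_eq_self.mpr
      intro n _
      rw [PySem.Set.contains_eq_listContains]
      rfl
    have hheap : w0.items.map (fun p => (-p.2, p.1)) = g.keys.map (fun n => (-(0 : Int), n)) := by
      rw [hitems, List.map_map]
      rfl
    have hmain := pvBisim g hnd hcl
      ((w0.items.map (fun p => (-p.2, p.1))).length + g.keys.length * (1 + degSum g))
      (w0.items.map (fun p => (-p.2, p.1))) w0 PySem.Set.empty [] (by rw [hu0])
      ?_ ?_
    · rw [hmain, hu0]
    · intro n hn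
      rw [hu0] at hn
      rw [hheap]
      rw [hgetD n hn]
      exact List.mem_map.mpr ⟨n, hn, rfl⟩
    · intro e he
      rw [hheap] at he
      obtain ⟨n, hn, rfl⟩ := List.mem_map.mp he
      refine ⟨hn, ?_⟩
      rw [hgetD n hn]
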